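-- pv_equiv track=rewrite | github.com/qlurkin/aoc | 2022/src/bin/day20/puzzle.py | mixxx
-- ===== SOURCE A (Python) =====
-- def move(L: list, i, delta):
--     item = L.pop(i)
--     dest = (i+delta)%(len(L))
--     if dest == 0:
--         dest = len(L)
--     L.insert(dest, item)
--
-- def find_index(numbers, i):
--     for j, number in enumerate(numbers):
--         if number[0] == i:
--             return j
--     raise ValueError("CACA")
--
-- def mixxx(numbers: list, n):
--     numbers = list(enumerate(numbers))
--     res = None
--     for _ in range(n):
--         for i in range(len(numbers)):
--             j = find_index(numbers, i)
--             move(numbers, j, numbers[j][1])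
--     return [number for _, number in numbers]
-- ===== SOURCE B (Python) =====
-- def mixxx(numbers: list, n):
--     # Maintains only the inverse permutation pos (original index -> current position),
--     # updating positions arithmetically instead of scanning/popping/inserting a pair list.
--     L = len(numbers)
--     pos = list(range(L))
--     for _ in range(n):
--         for i in range(L):
--             j = pos[i]
--             dest = (j + numbers[i]) % (L - 1)
--             if dest == 0:
--                 dest = L - 1
--             if dest > j:
--                 pos = [p - 1 if j < p <= dest else p for p in pos]
--             elif dest < j:
--                 pos = [p + 1 if dest <= p < j else p for p in pos]
--             pos[i] = dest
--     res = [0] * L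
--     for i in range(L):
--         res[pos[i]] = numbers[i]
--     return res
-- ===== Notes on version B (the rewrite author's own statement) =====
-- stated objective: alternative
-- what changed: B keeps only the inverse permutation (original index -> current position) and performs each move by an arithmetic shift of that array, instead of A's list of (index,value) pairs maintained with a find_index scan, pop and insert per move.
import Mathlib
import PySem

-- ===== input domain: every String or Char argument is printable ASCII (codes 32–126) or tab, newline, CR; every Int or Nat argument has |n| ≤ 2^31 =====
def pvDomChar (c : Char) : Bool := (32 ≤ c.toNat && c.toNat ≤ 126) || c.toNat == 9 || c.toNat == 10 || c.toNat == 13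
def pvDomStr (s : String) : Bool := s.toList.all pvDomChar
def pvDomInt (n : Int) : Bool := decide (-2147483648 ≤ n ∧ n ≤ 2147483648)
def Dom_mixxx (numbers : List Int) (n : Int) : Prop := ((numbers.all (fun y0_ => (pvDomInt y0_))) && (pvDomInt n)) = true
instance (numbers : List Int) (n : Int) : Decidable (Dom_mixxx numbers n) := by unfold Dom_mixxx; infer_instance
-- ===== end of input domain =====

-- B maintains only the inverse permutation (original index -> current position) and updates it
-- arithmetically, instead of A's (index,value) pair list with find_index scans, pops and inserts.


-- ===== PORT A =====
-- move(L, i, delta): pop at i, dest = (i+delta) % len(L) (ZeroDivisionError when the popped list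
-- is empty → `none` branch, excluded by Pre_), if dest == 0: dest = len(L), insert.
def pvMove (L : List (Int × Int)) (i : Int) (delta : Int) : List (Int × Int) :=
  match PySem.List.pop? L i with
  | none => L   -- IndexError (never reached under Pre_)
  | some (item, L') =>
    match PySem.Int.mod? (i + delta) (PySem.List.len L') with
    | none => L'   -- ZeroDivisionError (only when numbers has length 1; excluded by Pre_)
    | some d =>
      let dest := if d = 0 then PySem.List.len L' else d
      PySem.List.insert L' dest item

-- find_index: first j with numbers[j][0] == i, else ValueError (= none)
def pvFindIndex (numbers : List (Int × Int)) (i : Int) (j : Int) : Option Int :=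
  match numbers with
  | [] => none
  | x :: xs => if x.1 = i then some j else pvFindIndex xs i (j + 1)

-- the body of A's inner loop: j = find_index(numbers, i); move(numbers, j, numbers[j][1])
def pvStepA (st : List (Int × Int)) (i : Int) : List (Int × Int) :=
  match pvFindIndex st i 0 with
  | none => st   -- ValueError "CACA" (never reached)
  | some j => pvMove st j (PySem.List.pyGetD st j (0, 0)).2

def mixxx (numbers : List Int) (n : Int) : List Int :=
  let pairs := PySem.List.enumerate numbers
  let final := (PySem.List.pyRange 0 n 1).foldl (fun st _ =>
    (PySem.List.pyRange 0 (PySem.List.len st) 1).foldl pvStepA st) pairs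
  final.map Prod.snd

-- ===== PORT B =====
-- the body of B's inner loop, updating the inverse permutation `pos`
def pvStepB (nums : List Int) (pos : List Int) (i : Int) : List Int :=
  let j := PySem.List.pyGetD pos i 0
  match PySem.Int.mod? (j + PySem.List.pyGetD nums i 0) (PySem.List.len nums - 1) with
  | none => pos   -- ZeroDivisionError (length-1 input; excluded by Pre_)
  | some d =>
    let dest := if d = 0 then PySem.List.len nums - 1 else d
    let pos' := if j < dest then pos.map (fun p => if j < p ∧ p ≤ dest then p - 1 else p)
                else if dest < j then pos.map (fun p => if dest ≤ p ∧ p < j then p + 1 else p)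
                else pos
    PySem.List.pySetD pos' i dest

def mixxx_alt (numbers : List Int) (n : Int) : List Int :=
  let L : Int := PySem.List.len numbers
  let pos := (PySem.List.pyRange 0 n 1).foldl (fun pos _ =>
    (PySem.List.pyRange 0 L 1).foldl (pvStepB numbers) pos) (PySem.List.pyRange 0 L 1)
  (PySem.List.pyRange 0 L 1).foldl (fun res i =>
      PySem.List.pySetD res (PySem.List.pyGetD pos i 0) (PySem.List.pyGetD numbers i 0))
    (PySem.List.pyRepeat [0] L)

-- ===== PRECONDITION & SPEC =====
-- Pre_ excludes exactly the singleton lists with n >= 1: there both Pythons raise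
-- ZeroDivisionError (the modulus is taken by the emptied remainder list in A, by len-1 = 0 in B).
def Pre_mixxx (numbers : List Int) (n : Int) : Prop := numbers.length = 1 → n ≤ 0
instance (numbers : List Int) (n : Int) : Decidable (Pre_mixxx numbers n) := by unfold Pre_mixxx; infer_instance
def pvWitness_mixxx : List Int × Int := ([1, -2, 0, 4], 2)
def Spec_mixxx (numbers : List Int) (n : Int) (out : List Int) : Prop := out = mixxx_alt numbers n
instance (numbers : List Int) (n : Int) (out : List Int) : Decidable (Spec_mixxx numbers n out) := by unfold Spec_mixxx; infer_instance

-- ===== CLAIM (what is proved, stated in full; the proofs are below) =====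
def Claim_equal_mixxx : Prop := ∀ (numbers : List Int) (n : Int), Dom_mixxx numbers n → Pre_mixxx numbers n → Spec_mixxx numbers n (mixxx numbers n)

-- ===== LEMMAS AND PROOFS =====

-- The simulation invariant: `pos` is the inverse permutation of A's pair list `P`.
def pvInv (nums : List Int) (P : List (Int × Int)) (pos : List Int) : Prop :=
  P.length = nums.length ∧ pos.length = nums.length ∧
  ∀ k : Nat, k < nums.length →
    0 ≤ pos.getD k 0 ∧ pos.getD k 0 < (nums.length : Int) ∧
    P[(pos.getD k 0).toNat]? = some ((k : Int), nums.getD k 0)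

-- two folds over the same list preserve a relation between their accumulators
theorem pvFoldRel {α β γ : Type} (R : α → β → Prop) (f : α → γ → α) (g : β → γ → β)
    (l : List γ) (h : ∀ a b c, c ∈ l → R a b → R (f a c) (g b c)) :
    ∀ a b, R a b → R (l.foldl f a) (l.foldl g b) := by
  induction l with
  | nil => intro a b hab; simpa using hab
  | cons x xs ih =>
    intro a b hab
    simp only [List.foldl_cons]
    exact ih (fun a b c hc => h a b c (List.mem_cons_of_mem _ hc)) _ _
      (h a b x List.mem_cons_self hab)

theorem pvInv_inj {nums : List Int} {P : List (Int × Int)} {pos : List Int}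
    (h : pvInv nums P pos) {k1 k2 : Nat} (h1 : k1 < nums.length) (h2 : k2 < nums.length)
    (he : pos.getD k1 0 = pos.getD k2 0) : k1 = k2 := by
  obtain ⟨-, -, hk⟩ := h
  have a1 := (hk k1 h1).2.2
  have a2 := (hk k2 h2).2.2
  rw [he, a2] at a1
  simp only [Option.some.injEq, Prod.mk.injEq] at a1
  exact_mod_cast a1.1.symm


theorem pvInv_surj {nums : List Int} {P : List (Int × Int)} {pos : List Int}
    (h : pvInv nums P pos) {q : Nat} (hq : q < nums.length) :
    ∃ k, k < nums.length ∧ pos.getD k 0 = (q : Int) := by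
  have hlen := h.2.1
  set L := nums.length with hLdef
  have hb : ∀ k : Fin L, (pos.getD k 0).toNat < L := by
    intro k
    have := (h.2.2 k k.2).2.1
    have h0 := (h.2.2 k k.2).1
    omega
  let f : Fin L → Fin L := fun k => ⟨(pos.getD k 0).toNat, hb k⟩
  have hinj : Function.Injective f := by
    intro k1 k2 he
    have h0 := (h.2.2 k1 k1.2).1
    have h0' := (h.2.2 k2 k2.2).1
    have : (pos.getD k1 0).toNat = (pos.getD k2 0).toNat := congrArg Fin.val he
    exact Fin.ext (pvInv_inj h k1.2 k2.2 (by omega))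
  have hsurj : Function.Surjective f := Finite.surjective_of_injective hinj
  obtain ⟨k, hk⟩ := hsurj ⟨q, hq⟩
  refine ⟨k, k.2, ?_⟩
  have h0 := (h.2.2 k k.2).1
  have : (pos.getD k 0).toNat = q := congrArg Fin.val hk
  omega

theorem pvFindIndex_eq (P : List (Int × Int)) (i : Int) (q : Nat) (c : Int)
    (hq : P[q]?.map Prod.fst = some i)
    (huniq : ∀ r : Nat, P[r]?.map Prod.fst = some i → r = q) :
    pvFindIndex P i c = some (c + q) := by
  induction P generalizing q c with
  | nil => simp at hq
  | cons x xs ih =>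
    by_cases hx : x.1 = i
    · have hq0 : q = 0 := (huniq 0 (by simp [hx])).symm
      subst hq0
      simp [pvFindIndex, hx]
    · have hq0 : q ≠ 0 := by
        intro h0; subst h0; simp at hq; exact hx hq
      obtain ⟨q', rfl⟩ : ∃ q', q = q' + 1 := ⟨q - 1, by omega⟩
      rw [pvFindIndex]
      simp only [hx, if_false]
      have := ih q' (c + 1) (by simpa using hq) (fun r hr => by
        have := huniq (r + 1) (by simpa using hr); omega)
      rw [this]; congr 1; push_cast; ring


theorem pvInv_find {nums : List Int} {P : List (Int × Int)} {pos : List Int}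
    (h : pvInv nums P pos) {i : Nat} (hi : i < nums.length) :
    pvFindIndex P (i : Int) 0 = some (pos.getD i 0) := by
  obtain ⟨h0, hlt, hP⟩ := (h.2.2 i hi)
  have := pvFindIndex_eq P (i : Int) (pos.getD i 0).toNat 0
    (by rw [hP]; rfl)
    (fun r hr => by
      -- r is a valid index of P with fst = i
      have hrlen : r < P.length := by
        by_contra hbig
        rw [List.getElem?_eq_none (by omega)] at hr
        simp at hr
      obtain ⟨k, hk, hke⟩ := pvInv_surj h (q := r) (by have := h.1; omega)
      have := (h.2.2 k hk).2.2
      rw [hke] at this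
      simp only [Int.toNat_natCast] at this
      rw [this] at hr
      simp only [Option.map_some, Option.some.injEq] at hr
      have hki : k = i := by exact_mod_cast hr
      subst hki
      omega)
  rw [this]
  congr 1
  omega


theorem pvStep_inv {nums : List Int} (hL : nums.length ≠ 1) {P : List (Int × Int)}
    {pos : List Int} (h : pvInv nums P pos) {i : Nat} (hi : i < nums.length) :
    pvInv nums (pvStepA P (i : Int)) (pvStepB nums pos (i : Int)) := by
  have hPlen := h.1
  have hposlen := h.2.1
  have hL2 : 2 ≤ nums.length := by omega
  obtain ⟨hj0, hjL, hPj⟩ := h.2.2 i hi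
  set j : Int := pos.getD i 0 with hjdef
  set jn : Nat := j.toNat with hjndef
  have hjcast : j = (jn : Int) := by omega
  have hjnL : jn < nums.length := by omega
  set v : Int := nums.getD i 0 with hvdef
  -- the value numbers[j] on A's side
  have hPjget : P[jn]? = some ((i : Int), v) := hPj
  have hgetP : PySem.List.pyGetD P j ((0 : Int), (0 : Int)) = ((i : Int), v) := by
    rw [hjcast, PySem.List.pyGetD_natCast, List.getD_eq_getElem?_getD, hPjget]; rfl
  set L' : List (Int × Int) := P.eraseIdx jn with hL'def
  have hL'len : L'.length = nums.length - 1 := by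
    rw [hL'def, List.length_eraseIdx_of_lt (by omega)]; omega
  have hlenL' : PySem.List.len L' = (nums.length : Int) - 1 := by
    simp [PySem.List.len, hL'len]; omega
  have hm0 : (nums.length : Int) - 1 ≠ 0 := by omega
  set m : Int := (nums.length : Int) - 1 with hmdef
  set d : Int := PySem.Int.mod (j + v) m with hddef
  have hd0 : 0 ≤ d := PySem.Int.mod_nonneg _ (by omega)
  have hdm : d < m := PySem.Int.mod_lt _ (by omega)
  have hmod? : PySem.Int.mod? (j + v) m = some d := by
    simp [PySem.Int.mod?, PySem.Int.mod, hm0, hddef]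
  set dest : Int := if d = 0 then m else d with hdestdef
  have hdest1 : 1 ≤ dest := by rw [hdestdef]; split <;> omega
  have hdestm : dest ≤ m := by rw [hdestdef]; split <;> omega
  set dn : Nat := dest.toNat with hdndef
  have hdestcast : dest = (dn : Int) := by omega
  have hdnL' : dn ≤ L'.length := by omega
  -- reduce A's step
  have hpop : PySem.List.pop? P j = some (((i : Int), v), L') := by
    have hPjv : P[jn] = ((i : Int), v) := by
      have := hPjget; rwa [List.getElem?_eq_getElem (by omega), Option.some.injEq] at this
    rw [hjcast, PySem.List.pop?_natCast P jn (by omega), hPjv, hL'def]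
  have hA : pvStepA P (i : Int) = List.take dn L' ++ ((i : Int), v) :: List.drop dn L' := by
    rw [pvStepA, pvInv_find h hi, ← hjdef]
    show pvMove P j (PySem.List.pyGetD P j ((0 : Int), (0 : Int))).2 = _
    rw [hgetP, pvMove, hpop]
    show (match PySem.Int.mod? (j + v) (PySem.List.len L') with
      | none => L'
      | some d => PySem.List.insert L' (if d = 0 then PySem.List.len L' else d) ((i : Int), v)) = _
    rw [hlenL', hmod?]
    show PySem.List.insert L' (if d = 0 then m else d) ((i : Int), v) = _
    rw [← hdestdef, hdestcast, PySem.List.insert_natCast _ _ _ hdnL']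
  -- reduce B's step
  set f : Int → Int :=
    (if j < dest then (fun p => if j < p ∧ p ≤ dest then p - 1 else p)
     else if dest < j then (fun p => if dest ≤ p ∧ p < j then p + 1 else p)
     else id) with hfdef
  have hB : pvStepB nums pos (i : Int) = (pos.map f).set i dest := by
    rw [pvStepB]
    simp only [PySem.List.pyGetD_natCast, ← hjdef]
    have hlen : PySem.List.len nums - 1 = m := by simp [PySem.List.len, hmdef]
    simp only [hlen, ← hvdef, hmod?]
    show PySem.List.pySetD
        (if j < (if d = 0 then m else d) then
          List.map (fun p => if j < p ∧ p ≤ (if d = 0 then m else d) then p - 1 else p) pos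
        else if (if d = 0 then m else d) < j then
          List.map (fun p => if (if d = 0 then m else d) ≤ p ∧ p < j then p + 1 else p) pos
        else pos) (i : Int) (if d = 0 then m else d) = _
    simp only [← hdestdef]
    rw [PySem.List.pySetD_natCast]
    congr 1
    rw [hfdef]
    split_ifs <;> simp
  -- now prove the invariant for the new states
  rw [hA, hB]
  set P' : List (Int × Int) := List.take dn L' ++ ((i : Int), v) :: List.drop dn L' with hP'def
  have hTlen : (List.take dn L').length = dn := by
    rw [List.length_take]; omega
  have hP'get : ∀ r : Nat,
      P'[r]? = if r < dn then L'[r]? else if r = dn then some ((i : Int), v) else L'[r - 1]? := by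
    intro r
    by_cases h1 : r < dn
    · rw [hP'def, List.getElem?_append_left (by omega), List.getElem?_take, if_pos h1, if_pos h1]
    · rw [hP'def, List.getElem?_append_right (by omega), hTlen, if_neg h1]
      by_cases h2 : r = dn
      · subst h2; simp
      · rw [if_neg h2]
        obtain ⟨s, hs⟩ : ∃ s, r - dn = s + 1 := ⟨r - dn - 1, by omega⟩
        rw [hs, List.getElem?_cons_succ, List.getElem?_drop]
        congr 1; omega
  have hL'get : ∀ r : Nat, L'[r]? = if r < jn then P[r]? else P[r + 1]? := by
    intro r; rw [hL'def, List.getElem?_eraseIdx]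
  have hP'len : P'.length = nums.length := by
    rw [hP'def]; simp only [List.length_append, List.length_cons, List.length_drop, hTlen]
    omega
  refine ⟨hP'len, by simp [hposlen], ?_⟩
  intro k hk
  by_cases hki : k = i
  · subst hki
    have hset : ((pos.map f).set k dest).getD k 0 = dest := by
      rw [List.getD_eq_getElem?_getD, List.getElem?_set_self (by simp; omega)]; rfl
    rw [hset]
    refine ⟨by omega, by omega, ?_⟩
    have : dest.toNat = dn := by omega
    rw [this, hP'get]
    simp [hvdef, List.getD_eq_getElem?_getD]
  · obtain ⟨hq0, hqL, hPq⟩ := h.2.2 k hk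
    set q : Int := pos.getD k 0 with hqdef
    set qn : Nat := q.toNat with hqndef
    have hqcast : q = (qn : Int) := by omega
    have hqj : q ≠ j := by
      intro he
      exact hki (pvInv_inj h hk hi (by rw [← hqdef, ← hjdef, he]))
    have hqnjn : qn ≠ jn := by omega
    have hqnL : qn < nums.length := by omega
    have hset : ((pos.map f).set i dest).getD k 0 = f q := by
      rw [List.getD_eq_getElem?_getD, List.getElem?_set_ne (by omega), List.getElem?_map,
        List.getElem?_eq_getElem (show k < pos.length by omega)]
      simp only [Option.map_some, Option.getD_some]
      have hq' : pos[k] = q := by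
        rw [hqdef, List.getD_eq_getElem?_getD, List.getElem?_eq_getElem (by omega)]
        rfl
      rw [hq']
    have key : ∀ wn a : Nat, (a = if qn < jn then qn else qn - 1) →
        (wn = if a < dn then a else a + 1) → P'[wn]? = P[qn]? := by
      intro wn a ha hwn
      have hLa : L'[a]? = P[qn]? := by
        by_cases h1 : qn < jn
        · rw [if_pos h1] at ha; subst ha; rw [hL'get, if_pos h1]
        · rw [if_neg h1] at ha; subst ha
          rw [hL'get, if_neg (by omega)]
          congr 1; omega
      by_cases h2 : a < dn
      · rw [if_pos h2] at hwn; subst hwn; rw [hP'get, if_pos h2]; exact hLa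
      · rw [if_neg h2] at hwn; subst hwn
        rw [hP'get, if_neg (by omega), if_neg (by omega)]
        simpa using hLa
    rw [hset]
    rw [hfdef]
    split_ifs with hb1 hb2
    · -- j < dest
      simp only []
      by_cases hc : j < q ∧ q ≤ dest
      · rw [if_pos hc]
        refine ⟨by omega, by omega, ?_⟩
        have hkey : P'[qn - 1]? = P[qn]? :=
          key (qn - 1) (qn - 1) (by rw [if_neg (by omega)]) (by rw [if_pos (by omega)])
        rw [(by omega : (q - 1).toNat = qn - 1), hkey]; exact hPq
      · rw [if_neg hc]
        refine ⟨by omega, by omega, ?_⟩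
        have hkey : P'[qn]? = P[qn]? := by
          by_cases hq1 : qn < jn
          · exact key qn qn (by rw [if_pos hq1]) (by rw [if_pos (by omega)])
          · exact key qn (qn - 1) (by rw [if_neg hq1]) (by rw [if_neg (by omega)]; omega)
        rw [(by omega : q.toNat = qn), hkey]; exact hPq
    · -- dest < j
      simp only []
      by_cases hc : dest ≤ q ∧ q < j
      · rw [if_pos hc]
        refine ⟨by omega, by omega, ?_⟩
        have hkey : P'[qn + 1]? = P[qn]? :=
          key (qn + 1) qn (by rw [if_pos (by omega)]) (by rw [if_neg (by omega)])
        rw [(by omega : (q+1).toNat = qn + 1), hkey]; exact hPq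
      · rw [if_neg hc]
        refine ⟨by omega, by omega, ?_⟩
        have hkey : P'[qn]? = P[qn]? := by
          by_cases hq1 : qn < jn
          · exact key qn qn (by rw [if_pos hq1]) (by rw [if_pos (by omega)])
          · exact key qn (qn - 1) (by rw [if_neg hq1]) (by rw [if_neg (by omega)]; omega)
        rw [(by omega : q.toNat = qn), hkey]; exact hPq
    · -- dest = j
      simp only [id]
      refine ⟨by omega, by omega, ?_⟩
      have hdj : dest = j := by omega
      have hkey : P'[qn]? = P[qn]? := by
        by_cases hq1 : qn < jn
        · exact key qn qn (by rw [if_pos hq1]) (by rw [if_pos (by omega)])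
        · exact key qn (qn - 1) (by rw [if_neg hq1]) (by rw [if_neg (by omega)]; omega)
      rw [(by omega : q.toNat = qn), hkey]; exact hPq


theorem pvInner_inv {nums : List Int} (hL : nums.length ≠ 1) {P : List (Int × Int)}
    {pos : List Int} (h : pvInv nums P pos) :
    pvInv nums ((PySem.List.pyRange 0 (PySem.List.len P) 1).foldl pvStepA P)
      ((PySem.List.pyRange 0 (PySem.List.len nums) 1).foldl (pvStepB nums) pos) := by
  have hlenP : PySem.List.len P = PySem.List.len nums := by simp [PySem.List.len, h.1]
  rw [hlenP]
  refine pvFoldRel (pvInv nums) _ _ _ ?_ _ _ h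
  intro a b c hc hR
  obtain ⟨h1, h2⟩ := PySem.List.mem_pyRange_one.mp hc
  have h2' : c.toNat < nums.length := by simp [PySem.List.len_eq] at h2; omega
  have hc' : c = ((c.toNat : Nat) : Int) := by omega
  rw [hc']
  exact pvStep_inv hL hR h2'


theorem pvReadout_aux {nums : List Int} {P : List (Int × Int)} {pos : List Int}
    (h : pvInv nums P pos) :
    ∀ m : Nat, m ≤ nums.length → ∀ res0 : List Int, res0.length = nums.length →
      ((PySem.List.pyRange 0 (m : Int) 1).foldl (fun res i =>
          PySem.List.pySetD res (PySem.List.pyGetD pos i 0) (PySem.List.pyGetD nums i 0))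
        res0).length = nums.length ∧
      ∀ q : Nat, q < nums.length →
        ((∀ k : Nat, k < m → pos.getD k 0 ≠ (q : Int)) →
          ((PySem.List.pyRange 0 (m : Int) 1).foldl (fun res i =>
            PySem.List.pySetD res (PySem.List.pyGetD pos i 0) (PySem.List.pyGetD nums i 0))
            res0)[q]? = res0[q]?) ∧
        (∀ k : Nat, k < m → pos.getD k 0 = (q : Int) →
          ((PySem.List.pyRange 0 (m : Int) 1).foldl (fun res i =>
            PySem.List.pySetD res (PySem.List.pyGetD pos i 0) (PySem.List.pyGetD nums i 0))
            res0)[q]? = some (nums.getD k 0)) := by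
  intro m
  induction m with
  | zero =>
    intro _ res0 hres0
    rw [(by norm_num : ((0 : Nat) : Int) = 0), PySem.List.pyRange_one_eq_nil le_rfl]
    simp only [List.foldl_nil]
    refine ⟨hres0, ?_⟩
    intro q hq
    constructor
    · intros
      trivial
    · intro k hk
      omega
  | succ m ih =>
    intro hm res0 hres0
    obtain ⟨ihlen, ihget⟩ := ih (by omega) res0 hres0
    have hsplit : PySem.List.pyRange 0 ((m + 1 : Nat) : Int) 1 =
        PySem.List.pyRange 0 (m : Int) 1 ++ [(m : Int)] := by
      rw [← PySem.List.pyRange_one_succ_right (by positivity)]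
      norm_cast
    rw [hsplit, List.foldl_append]
    set Fm := (PySem.List.pyRange 0 (m : Int) 1).foldl (fun res i =>
      PySem.List.pySetD res (PySem.List.pyGetD pos i 0) (PySem.List.pyGetD nums i 0)) res0 with hFm
    simp only [List.foldl_cons, List.foldl_nil]
    obtain ⟨hp0, hpL, _⟩ := h.2.2 m (by omega)
    set p : Int := pos.getD m 0 with hpdef
    have hgp : PySem.List.pyGetD pos (m : Int) 0 = p := by
      rw [PySem.List.pyGetD_natCast]
    have hgv : PySem.List.pyGetD nums (m : Int) 0 = nums.getD m 0 := by
      rw [PySem.List.pyGetD_natCast]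
    have hpcast : p = ((p.toNat : Nat) : Int) := by omega
    have hset : PySem.List.pySetD Fm (PySem.List.pyGetD pos (m : Int) 0)
        (PySem.List.pyGetD nums (m : Int) 0) = Fm.set p.toNat (nums.getD m 0) := by
      rw [hgp, hgv, PySem.List.pySetD_of_nonneg _ _ hp0]
    rw [hset]
    refine ⟨by simp [ihlen], ?_⟩
    intro q hq
    constructor
    · intro hnone
      rw [List.getElem?_set_ne (by have := hnone m (by omega); omega)]
      exact (ihget q hq).1 (fun k hk => hnone k (by omega))
    · intro k hk hke
      by_cases hkm : k = m
      · subst hkm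
        have : p.toNat = q := by omega
        rw [this] at *
        rw [List.getElem?_set_self (by omega)]
      · have hk' : k < m := by omega
        have hne : p ≠ (q : Int) := by
          intro he
          exact hkm (pvInv_inj h (show k < nums.length by omega) (show m < nums.length by omega) (hke.trans (he.symm.trans hpdef)))
        rw [List.getElem?_set_ne (by omega)]
        exact (ihget q hq).2 k hk' hke

theorem pvReadout {nums : List Int} {P : List (Int × Int)} {pos : List Int}
    (h : pvInv nums P pos) :
    (PySem.List.pyRange 0 (PySem.List.len nums) 1).foldl (fun res i =>
        PySem.List.pySetD res (PySem.List.pyGetD pos i 0) (PySem.List.pyGetD nums i 0))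
      (PySem.List.pyRepeat [0] (PySem.List.len nums)) = P.map Prod.snd := by
  simp only [PySem.List.len_eq]
  have hres0 : (PySem.List.pyRepeat [(0 : Int)] ((nums.length : Nat) : Int)).length = nums.length := by
    rw [PySem.List.pyRepeat_singleton]
    simp
  obtain ⟨hflen, hfget⟩ := pvReadout_aux h nums.length le_rfl _ hres0
  apply List.ext_getElem?
  intro q
  by_cases hq : q < nums.length
  · obtain ⟨k, hk, hke⟩ := pvInv_surj h hq
    rw [(hfget q hq).2 k hk hke]
    have hPq : P[q]? = some ((k : Int), nums.getD k 0) := by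
      have := (h.2.2 k hk).2.2
      rw [hke] at this
      simpa using this
    rw [List.getElem?_map, hPq]
    rfl
  · rw [List.getElem?_eq_none (by omega), List.getElem?_eq_none (by simp [h.1]; omega)]


theorem pvInv_init (nums : List Int) :
    pvInv nums (PySem.List.enumerate nums) (PySem.List.pyRange 0 (PySem.List.len nums) 1) := by
  refine ⟨by simp [PySem.List.length_enumerate], by simp [PySem.List.length_pyRange_one], ?_⟩
  intro k hk
  have hget : (PySem.List.pyRange 0 (PySem.List.len nums) 1).getD k 0 = (k : Int) := by
    rw [List.getD_eq_getElem?_getD, PySem.List.getElem?_pyRange_one]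
    simp only [PySem.List.len_eq]
    simp [hk]
  rw [hget]
  refine ⟨by positivity, by exact_mod_cast hk, ?_⟩
  rw [Int.toNat_natCast, PySem.List.getElem?_enumerate]
  rw [List.getElem?_eq_getElem hk]
  simp [List.getD_eq_getElem?_getD, List.getElem?_eq_getElem hk]


-- ===== VERDICT (by name: the statement is the Claim_ definition above) =====
theorem mixxx_spec : Claim_equal_mixxx := by
  intro numbers n _ hpre
  unfold Spec_mixxx mixxx mixxx_alt
  have hfinal : pvInv numbers
      ((PySem.List.pyRange 0 n 1).foldl (fun st _ =>
        (PySem.List.pyRange 0 (PySem.List.len st) 1).foldl pvStepA st)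
        (PySem.List.enumerate numbers))
      ((PySem.List.pyRange 0 n 1).foldl (fun pos _ =>
        (PySem.List.pyRange 0 (PySem.List.len numbers) 1).foldl (pvStepB numbers) pos)
        (PySem.List.pyRange 0 (PySem.List.len numbers) 1)) := by
    refine pvFoldRel (pvInv numbers) _ _ _ ?_ _ _ (pvInv_init numbers)
    intro P pos c hc hR
    have hone : numbers.length ≠ 1 := by
      intro h1
      obtain ⟨h0c, hcn⟩ := PySem.List.mem_pyRange_one.mp hc
      have := hpre h1
      omega
    exact pvInner_inv hone hR
  exact (pvReadout hfinal).symm
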